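-- pv_equiv track=rewrite | github.com/uchime1234/full-stack-cloud-managment-tools | backend-1/authhentication/myground/Discovery/elb_discovery.py | summarize_target_health
-- ===== SOURCE A (Python) =====
-- def summarize_target_health(target_health):
--     """Summarize target health status"""
--     summary = {'healthy': 0, 'unhealthy': 0, 'unused': 0, 'draining': 0}
--     for target in target_health:
--         state = target.get('TargetHealth', {}).get('State', 'unknown')
--         if state == 'healthy':
--             summary['healthy'] += 1
--         elif state == 'unhealthy':
--             summary['unhealthy'] += 1
--         elif state == 'unused':
--             summary['unused'] += 1
--         elif state == 'draining':
--             summary['draining'] += 1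
--     return summary
-- ===== SOURCE B (Python) =====
-- def summarize_target_health(target_health):
--     """Summarize target health status"""
--     def count_state(key):
--         n = 0
--         for target in target_health:
--             if target.get('TargetHealth', {}).get('State', 'unknown') == key:
--                 n += 1
--         return n
--     return {k: count_state(k) for k in ('healthy', 'unhealthy', 'unused', 'draining')}
-- ===== Notes on version B (the rewrite author's own statement) =====
-- stated objective: alternative
-- what changed: B replaces A's single accumulating pass with an if/elif cascade over a mutable 4-counter dict by four independent counting passes, one per fixed key, with no shared accumulator or branching cascade.
import Mathlib
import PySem

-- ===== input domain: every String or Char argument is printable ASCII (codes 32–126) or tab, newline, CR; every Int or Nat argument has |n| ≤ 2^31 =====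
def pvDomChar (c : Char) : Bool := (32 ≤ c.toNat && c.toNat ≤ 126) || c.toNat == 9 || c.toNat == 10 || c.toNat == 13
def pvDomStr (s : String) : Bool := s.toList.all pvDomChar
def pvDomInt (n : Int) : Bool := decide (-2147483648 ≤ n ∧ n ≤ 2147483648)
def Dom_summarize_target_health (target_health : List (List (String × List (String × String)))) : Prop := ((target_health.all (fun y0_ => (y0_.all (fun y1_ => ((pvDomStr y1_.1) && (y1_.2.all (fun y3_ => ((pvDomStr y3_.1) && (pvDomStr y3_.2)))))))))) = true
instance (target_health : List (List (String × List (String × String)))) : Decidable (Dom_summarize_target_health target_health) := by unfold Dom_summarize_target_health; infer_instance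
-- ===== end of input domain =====

-- B replaces A's single accumulating pass over a mutable 4-counter dict by four independent counting passes, one per fixed key (alternative decomposition, same big-O).

-- shared helper: target.get('TargetHealth', {}).get('State', 'unknown') (identical expression in A and B)
def pvStateOf (target : List (String × List (String × String))) : String :=
  (PySem.Dict.mk ((PySem.Dict.mk target).getD "TargetHealth" [])).getD "State" "unknown"

-- ===== PORT A =====
def summarize_target_health (target_health : List (List (String × List (String × String)))) : List (String × Int) :=
  let summary : PySem.Dict String Int :=
    PySem.Dict.mk [("healthy", 0), ("unhealthy", 0), ("unused", 0), ("draining", 0)]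
  let summary := target_health.foldl (fun summary target =>
    let state := pvStateOf target
    if state = "healthy" then summary.modify "healthy" 0 (· + 1)
    else if state = "unhealthy" then summary.modify "unhealthy" 0 (· + 1)
    else if state = "unused" then summary.modify "unused" 0 (· + 1)
    else if state = "draining" then summary.modify "draining" 0 (· + 1)
    else summary) summary
  summary.items

-- ===== PORT B =====
-- count_state: one full pass over target_health counting matches of `key`
def pvCountState (target_health : List (List (String × List (String × String)))) (key : String) : Int :=
  target_health.foldl (fun n target => if pvStateOf target = key then n + 1 else n) 0

def summarize_target_health_alt (target_health : List (List (String × List (String × String)))) : List (String × Int) :=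
  ["healthy", "unhealthy", "unused", "draining"].map (fun k => (k, pvCountState target_health k))

-- ===== PRECONDITION & SPEC =====
def Spec_summarize_target_health (target_health : List (List (String × List (String × String)))) (out : List (String × Int)) : Prop := out = summarize_target_health_alt target_health
instance (target_health : List (List (String × List (String × String)))) (out : List (String × Int)) : Decidable (Spec_summarize_target_health target_health out) := by unfold Spec_summarize_target_health; infer_instance

-- ===== CLAIM (what is proved, stated in full; the proofs are below) =====
def Claim_equal_summarize_target_health : Prop := ∀ (target_health : List (List (String × List (String × String)))), Dom_summarize_target_health target_health → Spec_summarize_target_health target_health (summarize_target_health target_health)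

-- ===== LEMMAS AND PROOFS =====

def pvStepA (d : PySem.Dict String Int) (target : List (String × List (String × String))) : PySem.Dict String Int :=
  let state := pvStateOf target
  if state = "healthy" then d.modify "healthy" 0 (· + 1)
  else if state = "unhealthy" then d.modify "unhealthy" 0 (· + 1)
  else if state = "unused" then d.modify "unused" 0 (· + 1)
  else if state = "draining" then d.modify "draining" 0 (· + 1)
  else d

theorem pvGetD_foldl (th : List (List (String × List (String × String)))) (d : PySem.Dict String Int) (k : String) :
    (th.foldl pvStepA d).getD k 0 =
      d.getD k 0 + (if k = "healthy" ∨ k = "unhealthy" ∨ k = "unused" ∨ k = "draining"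
                    then ((th.map pvStateOf).count k : Int) else 0) := by
  induction th generalizing d with
  | nil => simp
  | cons t th ih =>
    simp only [List.foldl_cons, ih, List.map_cons, List.count_cons]
    simp only [pvStepA]
    split_ifs with h1 h2 h3 h4 <;>
      (try rw [PySem.Dict.getD_modify]) <;> (try split_ifs) <;> simp_all <;> omega

theorem pvKeys_foldl (th : List (List (String × List (String × String)))) (d : PySem.Dict String Int)
    (h : ∀ k ∈ ["healthy", "unhealthy", "unused", "draining"], d.contains k = true) :
    (th.foldl pvStepA d).keys = d.keys := by
  induction th generalizing d with
  | nil => rfl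
  | cons t th ih =>
    rw [List.foldl_cons, ih]
    · simp only [pvStepA]
      split_ifs <;> simp_all [PySem.Dict.keys_modify, PySem.Dict.keys_insert_of_contains]
    · intro k hk
      simp only [pvStepA]
      split_ifs <;> simp_all [PySem.Dict.contains_modify] <;> rcases hk with rfl | rfl | rfl | rfl <;> simp_all

theorem pvCountState_eq (th : List (List (String × List (String × String)))) (k : String) :
    pvCountState th k = ((th.map pvStateOf).count k : Int) := by
  unfold pvCountState
  suffices h : ∀ (n : Int), th.foldl (fun n target => if pvStateOf target = k then n + 1 else n) n
      = n + ((th.map pvStateOf).count k : Int) by simpa using h 0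
  induction th with
  | nil => simp
  | cons t th ih =>
    intro n
    simp only [List.foldl_cons, List.map_cons, List.count_cons, ih]
    split_ifs <;> simp_all <;> omega

-- ===== VERDICT (by name: the statement is the Claim_ definition above) =====
theorem summarize_target_health_spec : Claim_equal_summarize_target_health := by
  intro th _
  unfold Spec_summarize_target_health summarize_target_health summarize_target_health_alt
  show (th.foldl pvStepA (PySem.Dict.mk [("healthy", 0), ("unhealthy", 0), ("unused", 0), ("draining", 0)])).items
      = List.map (fun k => (k, pvCountState th k)) ["healthy", "unhealthy", "unused", "draining"]
  have hkeys : (th.foldl pvStepA (PySem.Dict.mk [("healthy", 0), ("unhealthy", 0), ("unused", 0), ("draining", 0)])).keys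
      = ["healthy", "unhealthy", "unused", "draining"] := by
    rw [pvKeys_foldl]
    · decide
    · decide
  have hnd : (th.foldl pvStepA (PySem.Dict.mk [("healthy", 0), ("unhealthy", 0), ("unused", 0), ("draining", 0)])).keys.Nodup := by
    rw [hkeys]; decide
  rw [PySem.Dict.items_eq_map_keys _ hnd 0, hkeys]
  simp [pvGetD_foldl, pvCountState_eq]
  decide
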